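-- pv_equiv track=rewrite | github.com/yj-melissa/solved | 프로그래머스/unrated/135808. 과일 장수/과일 장수.py | solution
-- ===== SOURCE A (Python) =====
-- def solution(k, m, score):
--     answer = 0
--     score.sort(reverse = True)      # 가격 높은 순대로 정렬
--     e = m - 1                       # 각 상자별 최저 사과 인덱스
--     while e < len(score):
--         answer += score[e] * m
--         e += m
--     return answer
-- ===== SOURCE B (Python) =====
-- def solution(k, m, score):
--     score.sort(reverse=True)
--
--     def boxes(s):
--         if len(s) < m:
--             return 0
--         box, rest = s[:m], s[m:]
--         return boxes(rest) + box[-1] * m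
--
--     return boxes(score)
-- ===== Notes on version B (the rewrite author's own statement) =====
-- stated objective: alternative
-- what changed: B replaces A's index-jumping while loop over the sorted array (e = m-1, e += m) with a recursion on the list structure: repeatedly split off the front box s[:m], price it by its last element times m, and recurse on the remainder s[m:], so no index arithmetic is kept at all.
import Mathlib
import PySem

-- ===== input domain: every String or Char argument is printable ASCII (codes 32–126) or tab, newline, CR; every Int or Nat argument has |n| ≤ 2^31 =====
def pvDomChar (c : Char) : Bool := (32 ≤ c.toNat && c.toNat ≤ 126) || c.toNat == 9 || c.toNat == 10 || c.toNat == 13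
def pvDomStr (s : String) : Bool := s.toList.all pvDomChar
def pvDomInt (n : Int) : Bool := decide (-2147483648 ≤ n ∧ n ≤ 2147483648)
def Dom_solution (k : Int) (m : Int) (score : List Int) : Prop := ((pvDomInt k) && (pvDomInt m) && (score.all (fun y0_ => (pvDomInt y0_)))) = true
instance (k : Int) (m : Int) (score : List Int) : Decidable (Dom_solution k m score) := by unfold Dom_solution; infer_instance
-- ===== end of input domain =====

-- B replaces A's index-jumping while loop over the sorted array with a recursion on the
-- list structure (split off the front box s[:m], price it by its last element, recurse on
-- the rest); same cost class. NOTE: A sorts `score` in place (descending); B performs the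
-- same in-place sort, so the side effect matches as well as the return value.

-- ===== PORT A =====
-- while e < len(score): answer += score[e]*m; e += m   (0 < m is a totality guard only:
-- for m ≤ 0 the Python loop diverges or raises IndexError, outside Pre_)
def solutionLoop (s : List Int) (m : Int) (e : Int) (answer : Int) : Int :=
  if h : 0 < m ∧ e < (s.length : Int) then
    solutionLoop s m (e + m) (answer + (PySem.List.pyGetD s e 0) * m)
  else answer
termination_by ((s.length : Int) - e).toNat
decreasing_by omega

def solution (k : Int) (m : Int) (score : List Int) : Int :=
  solutionLoop (PySem.List.sorted score (fun x => x) true) m (m - 1) 0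

-- ===== PORT B =====
-- def boxes(s): if len(s) < m: return 0; box, rest = s[:m], s[m:]; return boxes(rest) + box[-1]*m
-- (0 < m is a totality guard only: for m ≤ 0 the Python recursion never terminates, outside
-- Pre_; box[-1] is pyGet? … (-1), defaulted — box is nonempty whenever the guard holds)
def solutionBoxes (m : Int) (s : List Int) : Int :=
  if h : 0 < m ∧ m ≤ (s.length : Int) then
    solutionBoxes m (PySem.List.slice s (some m) none)
      + ((PySem.List.pyGet? (PySem.List.slice s none (some m)) (-1)).getD 0) * m
  else 0
termination_by s.length
decreasing_by
  rw [PySem.List.slice_from s h.1.le]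
  simp only [List.length_drop]
  omega

def solution_alt (k : Int) (m : Int) (score : List Int) : Int :=
  solutionBoxes m (PySem.List.sorted score (fun x => x) true)

-- ===== PRECONDITION & SPEC =====
-- Pre_ excludes m ≤ 0, where neither Python returns (A: IndexError or an infinite loop;
-- B: infinite recursion).
def Pre_solution (k : Int) (m : Int) (score : List Int) : Prop := 1 ≤ m
instance (k : Int) (m : Int) (score : List Int) : Decidable (Pre_solution k m score) := by unfold Pre_solution; infer_instance
def pvWitness_solution : Int × Int × List Int := (4, 3, [4, 1, 2, 2, 3, 1, 1])
def Spec_solution (k : Int) (m : Int) (score : List Int) (out : Int) : Prop := out = solution_alt k m score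
instance (k : Int) (m : Int) (score : List Int) (out : Int) : Decidable (Spec_solution k m score out) := by unfold Spec_solution; infer_instance

-- ===== CLAIM (what is proved, stated in full; the proofs are below) =====
def Claim_equal_solution : Prop := ∀ (k : Int) (m : Int) (score : List Int), Dom_solution k m score → Pre_solution k m score → Spec_solution k m score (solution k m score)

-- ===== LEMMAS AND PROOFS =====

lemma loop_stop (s : List Int) (m e a : Int) (h : ¬ (0 < m ∧ e < (s.length : Int))) :
    solutionLoop s m e a = a := by
  rw [solutionLoop.eq_def, dif_neg h]

lemma loop_step (s : List Int) (m e a : Int) (h : 0 < m ∧ e < (s.length : Int)) :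
    solutionLoop s m e a = solutionLoop s m (e + m) (a + (PySem.List.pyGetD s e 0) * m) := by
  conv_lhs => rw [solutionLoop.eq_def]
  rw [dif_pos h]

lemma boxes_stop (m : Int) (s : List Int) (h : ¬ (0 < m ∧ m ≤ (s.length : Int))) :
    solutionBoxes m s = 0 := by
  rw [solutionBoxes.eq_def, dif_neg h]

lemma boxes_step (m : Int) (s : List Int) (h : 0 < m ∧ m ≤ (s.length : Int)) :
    solutionBoxes m s = solutionBoxes m (PySem.List.slice s (some m) none)
      + ((PySem.List.pyGet? (PySem.List.slice s none (some m)) (-1)).getD 0) * m := by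
  conv_lhs => rw [solutionBoxes.eq_def]
  rw [dif_pos h]

-- A's loop, restarted m positions later, is the loop over the list with the first m
-- elements dropped.
lemma loop_shift (mn : Nat) (hmn : 0 < mn) :
    ∀ (d : Nat) (s : List Int) (e acc : Int), 0 ≤ e → (s.length : Int) - e ≤ (d : Int) →
    solutionLoop s (mn : Int) (e + (mn : Int)) acc = solutionLoop (s.drop mn) (mn : Int) e acc := by
  intro d
  induction d with
  | zero =>
    intro s e acc he hd
    rw [loop_stop _ _ _ _ (by omega),
        loop_stop _ _ _ _ (by simp only [List.length_drop]; push_cast; omega)]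
  | succ d ih =>
    intro s e acc he hd
    by_cases hc : e + (mn : Int) < (s.length : Int)
    · have hc' : e < ((s.drop mn).length : Int) := by
        simp only [List.length_drop]; push_cast; omega
      rw [loop_step _ _ _ _ ⟨by exact_mod_cast hmn, hc⟩,
          loop_step _ _ _ _ ⟨by exact_mod_cast hmn, hc'⟩]
      have hget : PySem.List.pyGetD s (e + (mn : Int)) 0 = PySem.List.pyGetD (s.drop mn) e 0 := by
        rw [PySem.List.pyGetD_eq_getElem s 0 (by omega) (by omega)]
        rw [PySem.List.pyGetD_eq_getElem (s.drop mn) 0 he (by exact_mod_cast hc')]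
        simp only [List.getElem_drop]
        congr 1
        omega
      rw [hget]
      exact ih s (e + (mn : Int)) _ (by omega) (by omega)
    · have hc' : ¬ e < ((s.drop mn).length : Int) := by
        simp only [List.length_drop]; push_cast; omega
      rw [loop_stop _ _ _ _ (by tauto), loop_stop _ _ _ _ (by tauto)]

-- A's loop started at m-1 computes acc + B's box recursion.
lemma loop_eq_boxes (mn : Nat) (hmn : 0 < mn) :
    ∀ (n : Nat) (s : List Int), s.length ≤ n → ∀ (acc : Int),
    solutionLoop s (mn : Int) ((mn : Int) - 1) acc = acc + solutionBoxes (mn : Int) s := by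
  intro n
  induction n with
  | zero =>
    intro s hs acc
    have hnil : s = [] := List.eq_nil_of_length_eq_zero (by omega)
    subst hnil
    rw [loop_stop _ _ _ _ (by simp; omega), boxes_stop _ _ (by simp; omega)]
    omega
  | succ n ih =>
    intro s hs acc
    by_cases hlen : mn ≤ s.length
    · rw [loop_step _ _ _ _ ⟨by exact_mod_cast hmn, by push_cast; omega⟩,
          boxes_step _ _ ⟨by exact_mod_cast hmn, by exact_mod_cast hlen⟩]
      rw [loop_shift mn hmn s.length s ((mn : Int) - 1) _ (by omega) (by omega)]
      rw [PySem.List.slice_from s (by positivity), Int.toNat_natCast]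
      rw [ih (s.drop mn) (by simp only [List.length_drop]; omega)]
      -- the two box prices coincide: (s.take mn)[-1] = s[mn-1]
      have hbox : ((PySem.List.pyGet? (PySem.List.slice s none (some (mn : Int))) (-1)).getD 0)
          = PySem.List.pyGetD s ((mn : Int) - 1) 0 := by
        rw [PySem.List.slice_to_natCast]
        have hne : s.take mn ≠ [] := by
          have hl : (s.take mn).length = mn := by
            simp only [List.length_take]
            omega
          intro hc
          rw [hc] at hl
          simp at hl
          omega
        rw [PySem.List.pyGet?_neg_one, List.getLast?_eq_some_getLast hne, Option.getD_some]
        have h1 : (0:Int) ≤ (mn:Int) - 1 := by omega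
        have h2 : (mn:Int) - 1 < ((s.length:Nat) : Int) := by push_cast; omega
        rw [PySem.List.pyGetD_eq_getElem s 0 h1 h2]
        rw [List.getLast_eq_getElem]
        simp only [List.getElem_take, List.length_take]
        congr 1
        omega
      rw [hbox]
      ring
    · rw [loop_stop _ _ _ _ (by push_cast; omega), boxes_stop _ _ (by push_cast; omega)]
      omega

-- ===== VERDICT (by name: the statement is the Claim_ definition above) =====
theorem solution_spec : Claim_equal_solution := by
  intro k m score _ hpre
  unfold Spec_solution solution solution_alt
  have hm1 : (1:Int) ≤ m := hpre
  lift m to Nat using (by omega) with mn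
  have hmn : 0 < mn := by exact_mod_cast hm1
  set s := PySem.List.sorted score (fun x => x) true with hs
  simpa using loop_eq_boxes mn hmn s.length s le_rfl 0
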